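-- pv_equiv track=rewrite | github.com/deight93/baekjoon_online_judge | 프로그래머스/0/181935. 홀짝에 따라 다른 값 반환하기/홀짝에 따라 다른 값 반환하기.py | solution
-- ===== SOURCE A (Python) =====
-- def solution(n):
--     a = n // 2
--     if n % 2 == 1:
--         answer = 1
--         for i in range(1, a+1):
--             answer += (i*2)+1
--     else:
--         answer = 0
--         for i in range(1, a+1):
--             answer += (i*2)**2
--
--     return answer
-- ===== SOURCE B (Python) =====
-- def solution(n):
--     a = max(n // 2, 0)
--     if n % 2 == 1:
--         return (a + 1) ** 2
--     return 2 * a * (a + 1) * (2 * a + 1) // 3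
-- ===== Notes on version B (the rewrite author's own statement) =====
-- stated objective: faster
-- what changed: Replaced the O(n) summation loops with closed-form arithmetic: a perfect-square formula for the odd branch and the square-pyramidal-number formula for the even branch.
import Mathlib
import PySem

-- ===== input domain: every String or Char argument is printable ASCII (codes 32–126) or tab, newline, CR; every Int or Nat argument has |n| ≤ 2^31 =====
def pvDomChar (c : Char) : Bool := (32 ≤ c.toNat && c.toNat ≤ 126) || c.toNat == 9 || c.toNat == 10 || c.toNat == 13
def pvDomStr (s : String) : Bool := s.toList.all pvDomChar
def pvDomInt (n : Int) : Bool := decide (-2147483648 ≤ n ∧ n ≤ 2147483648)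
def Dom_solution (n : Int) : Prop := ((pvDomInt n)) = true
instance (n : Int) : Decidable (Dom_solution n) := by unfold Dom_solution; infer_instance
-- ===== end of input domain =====

-- B replaces A's O(n) summation loops with closed-form formulas (asymptotic speed-up; return value only).

-- ===== PORT A =====
def solution (n : Int) : Int :=
  let a := PySem.Int.floordiv n 2
  if PySem.Int.mod n 2 == 1 then
    (PySem.List.pyRange 1 (a + 1) 1).foldl (fun answer i => answer + (i * 2 + 1)) 1
  else
    (PySem.List.pyRange 1 (a + 1) 1).foldl (fun answer i => answer + (i * 2) ^ 2) 0

-- ===== PORT B =====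
def solution_alt (n : Int) : Int :=
  let a := max (PySem.Int.floordiv n 2) 0
  if PySem.Int.mod n 2 == 1 then
    (a + 1) ^ 2
  else
    PySem.Int.floordiv (2 * a * (a + 1) * (2 * a + 1)) 3

-- ===== PRECONDITION & SPEC =====
def Spec_solution (n : Int) (out : Int) : Prop := out = solution_alt n
instance (n : Int) (out : Int) : Decidable (Spec_solution n out) := by unfold Spec_solution; infer_instance

-- ===== CLAIM (what is proved, stated in full; the proofs are below) =====
def Claim_equal_solution : Prop := ∀ (n : Int), Dom_solution n → Spec_solution n (solution n)

-- ===== LEMMAS AND PROOFS =====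

theorem odd_sum (a : Int) (ha : 0 ≤ a) :
    (PySem.List.pyRange 1 (a + 1) 1).foldl (fun answer i => answer + (i * 2 + 1)) 1 = (a + 1) ^ 2 := by
  induction a, ha using Int.le_induction with
  | base => simp [PySem.List.pyRange_one_eq_nil (le_refl 1)]
  | succ a ha ih =>
      rw [show a + 1 + 1 = (a + 1) + 1 by ring,
        PySem.List.pyRange_one_succ_right (by omega : (1:Int) ≤ a + 1), List.foldl_append, ih]
      simp; ring

theorem even_sum (a : Int) (ha : 0 ≤ a) :
    (PySem.List.pyRange 1 (a + 1) 1).foldl (fun answer i => answer + (i * 2) ^ 2) 0 * 3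
      = 2 * a * (a + 1) * (2 * a + 1) := by
  induction a, ha using Int.le_induction with
  | base => simp [PySem.List.pyRange_one_eq_nil (le_refl 1)]
  | succ a ha ih =>
      rw [show a + 1 + 1 = (a + 1) + 1 by ring,
        PySem.List.pyRange_one_succ_right (by omega : (1:Int) ≤ a + 1), List.foldl_append]
      simp only [List.foldl_cons, List.foldl_nil]
      nlinarith [ih]

theorem even_closed (a : Int) (ha : 0 ≤ a) :
    (PySem.List.pyRange 1 (a + 1) 1).foldl (fun answer i => answer + (i * 2) ^ 2) 0
      = PySem.Int.floordiv (2 * a * (a + 1) * (2 * a + 1)) 3 := by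
  rw [← even_sum a ha]
  set s := (PySem.List.pyRange 1 (a + 1) 1).foldl (fun answer i => answer + (i * 2) ^ 2) 0
  rw [show s * 3 = 3 * s by ring]
  simp [PySem.Int.floordiv, Int.mul_fdiv_cancel_left s (by norm_num : (3:Int) ≠ 0)]

-- ===== VERDICT (by name: the statement is the Claim_ definition above) =====
theorem solution_spec : Claim_equal_solution := by
  intro n _
  unfold Spec_solution solution solution_alt
  dsimp only
  set a := PySem.Int.floordiv n 2 with ha
  by_cases h : 0 ≤ a
  · rw [max_eq_left h]
    split
    · exact odd_sum a h
    · exact even_closed a h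
  · rw [max_eq_right (by omega : a ≤ 0),
      PySem.List.pyRange_one_eq_nil (by omega : a + 1 ≤ 1)]
    split <;> simp [PySem.Int.floordiv]
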